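-- pv_equiv track=rewrite | github.com/Mykel-wD/Matura | matury/first_try/2016_maj(done)/63.py | deszyfr
-- ===== SOURCE A (Python) =====
-- def deszyfr(slowo1, slowo2):
--     z1 = ord(slowo1[0])
--     z2 = ord(slowo2[0])
--     if z1 > z2:
--         klucz = z1 - z2
--         ile = -1
--     else:
--         klucz = z2 - z1
--         ile = 1
--     for znak in range(len(slowo1)):
--         k = ord(slowo1[znak])
--         drugi = ord(slowo2[znak])
--         for dlugosc in range(klucz):
--             if z1 > z2:
--                 if k <= 65:
--                     k = 90
--                 else:
--                     k += ile
--             elif z2 > z1: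
--                 if k >= 90:
--                     k = 65
--                 else:
--                     k += ile
--
--         if k != ord(slowo2[znak]):
--             return True
--     return False
-- ===== SOURCE B (Python) =====
-- def deszyfr(slowo1, slowo2):
--     z1 = ord(slowo1[0])
--     z2 = ord(slowo2[0])
--     klucz = abs(z1 - z2)
--
--     def shift(k):
--         if z1 > z2:
--             d = max(k - 65, 0)
--             if klucz <= d:
--                 return k - klucz
--             return 65 + (26 - (klucz - d)) % 26
--         if z2 > z1:
--             d = max(90 - k, 0)
--             if klucz <= d:
--                 return k + klucz
--             return 65 + (klucz - d - 1) % 26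
--         return k
--
--     return any(shift(ord(a)) != ord(b) for a, b in zip(slowo1, slowo2))
-- ===== Notes on version B (the rewrite author's own statement) =====
-- stated objective: alternative
-- what changed: B replaces A's inner loop that shifts each character code one step at a time (klucz iterations per character, with wraparound branches) by a direct closed-form modular-arithmetic computation of the shifted code, and compares via any over zip instead of an index loop with early return.
-- outside the precondition, e.g. on deszyfr('FX', '<'): A returns True, B returns True; on deszyfr('AB', 'Z'): A raises IndexError, B returns False
import Mathlib
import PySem

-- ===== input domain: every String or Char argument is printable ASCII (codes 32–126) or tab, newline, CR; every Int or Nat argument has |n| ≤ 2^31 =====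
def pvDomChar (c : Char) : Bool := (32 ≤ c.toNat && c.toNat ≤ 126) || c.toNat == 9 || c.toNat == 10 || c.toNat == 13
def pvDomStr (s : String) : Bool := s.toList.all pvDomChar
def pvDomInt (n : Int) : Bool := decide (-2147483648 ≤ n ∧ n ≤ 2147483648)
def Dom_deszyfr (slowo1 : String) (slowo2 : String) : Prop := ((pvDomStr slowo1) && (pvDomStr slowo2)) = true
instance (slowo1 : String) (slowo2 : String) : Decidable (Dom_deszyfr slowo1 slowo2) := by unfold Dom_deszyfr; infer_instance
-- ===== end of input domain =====

-- B replaces A's per-step inner shift loop (klucz iterations per character) by a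
-- direct closed-form modular computation per character (alternative algorithm; fewer operations,
-- though klucz is bounded so no speed-up was measured).

-- ===== PORT A =====
-- ord(l[i]); the default is only reached outside Pre_deszyfr (where Python raises IndexError)
def pvOrd (l : List Char) (i : Int) : Int := ((PySem.List.pyGet? l i).getD ' ').toNat

-- body of A's inner 'for dlugosc in range(klucz)' loop
def pvStepA (z1 z2 ile k : Int) : Int :=
  if z1 > z2 then (if k ≤ 65 then 90 else k + ile)
  else if z2 > z1 then (if k ≥ 90 then 65 else k + ile)
  else k

-- A's inner loop: for dlugosc in range(klucz): …
def pvShiftA (z1 z2 klucz ile k : Int) : Int :=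
  (PySem.List.pyRange 0 klucz 1).foldl (fun k _ => pvStepA z1 z2 ile k) k

-- A's outer loop: for znak in range(len(slowo1)): … with early 'return True'
def pvLoopA (l1 l2 : List Char) (z1 z2 klucz ile : Int) (znak : Nat) : Bool :=
  if znak < l1.length then
    let k := pvShiftA z1 z2 klucz ile (pvOrd l1 znak)
    if k ≠ pvOrd l2 znak then true
    else pvLoopA l1 l2 z1 z2 klucz ile (znak + 1)
  else false
termination_by l1.length - znak

def deszyfr (slowo1 : String) (slowo2 : String) : Bool :=
  let l1 := slowo1.toList
  let l2 := slowo2.toList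
  let z1 := pvOrd l1 0
  let z2 := pvOrd l2 0
  let p := if z1 > z2 then (z1 - z2, (-1 : Int)) else (z2 - z1, (1 : Int))
  pvLoopA l1 l2 z1 z2 p.1 p.2 0

-- ===== PORT B =====
-- closed-form shift of one character code by klucz = |z1 - z2| steps
def pvShiftB (z1 z2 klucz k : Int) : Int :=
  if z1 > z2 then
    let d := max (k - 65) 0
    if klucz ≤ d then k - klucz else 65 + (26 - (klucz - d)) % 26
  else if z2 > z1 then
    let d := max (90 - k) 0
    if klucz ≤ d then k + klucz else 65 + (klucz - d - 1) % 26
  else k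

def deszyfr_alt (slowo1 : String) (slowo2 : String) : Bool :=
  let l1 := slowo1.toList
  let l2 := slowo2.toList
  let z1 : Int := ((l1.headD ' ').toNat : Int)
  let z2 : Int := ((l2.headD ' ').toNat : Int)
  let klucz := |z1 - z2|
  (l1.zip l2).any (fun p => pvShiftB z1 z2 klucz (p.1.toNat : Int) ≠ (p.2.toNat : Int))

-- ===== PRECONDITION & SPEC =====
-- Pre_ excludes empty strings (A raises IndexError on slowo1[0]/slowo2[0]) and slowo2 shorter
-- than slowo1, where A raises IndexError at index len(slowo2) unless an earlier character
-- mismatch happens to return True first.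
def Pre_deszyfr (slowo1 : String) (slowo2 : String) : Prop :=
  slowo1.toList ≠ [] ∧ slowo2.toList ≠ [] ∧ slowo1.toList.length ≤ slowo2.toList.length
instance (slowo1 : String) (slowo2 : String) : Decidable (Pre_deszyfr slowo1 slowo2) := by
  unfold Pre_deszyfr; infer_instance

def pvWitness_deszyfr : String × String := ("ABC", "DEF")

def Spec_deszyfr (slowo1 : String) (slowo2 : String) (out : Bool) : Prop := out = deszyfr_alt slowo1 slowo2
instance (slowo1 : String) (slowo2 : String) (out : Bool) : Decidable (Spec_deszyfr slowo1 slowo2 out) := by unfold Spec_deszyfr; infer_instance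

-- ===== CLAIM (what is proved, stated in full; the proofs are below) =====
def Claim_equal_deszyfr : Prop := ∀ (slowo1 : String) (slowo2 : String), Dom_deszyfr slowo1 slowo2 → Pre_deszyfr slowo1 slowo2 → Spec_deszyfr slowo1 slowo2 (deszyfr slowo1 slowo2)

-- ===== LEMMAS AND PROOFS =====

-- A's inner loop is iteration of its step function
theorem pvShiftA_eq_iterate (z1 z2 ile k : Int) (n : Nat) :
    pvShiftA z1 z2 (n : Int) ile k = (pvStepA z1 z2 ile)^[n] k := by
  induction n generalizing k with
  | zero => simp [pvShiftA, PySem.List.pyRange_one_eq_nil]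
  | succ m ih =>
    have h : ((m + 1 : Nat) : Int) = (m : Int) + 1 := by push_cast; ring
    rw [pvShiftA, h, PySem.List.pyRange_one_succ_right (by positivity),
        List.foldl_append, List.foldl_cons, List.foldl_nil]
    have ihk := ih k
    rw [pvShiftA] at ihk
    rw [ihk]
    exact (Function.iterate_succ_apply' _ _ _).symm

-- one step of A's shift agrees with B's closed form (all three key directions at once)
theorem pvShiftB_step (z1 z2 k : Int) (n : Nat) :
    pvShiftB z1 z2 ((n : Int) + 1) k
      = pvShiftB z1 z2 (n : Int) (pvStepA z1 z2 (if z1 > z2 then -1 else 1) k) := by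
  simp only [pvShiftB, pvStepA]
  split_ifs <;> omega

-- B's closed form computes A's iterated shift
theorem pvShiftAB (z1 z2 k : Int) (n : Nat) :
    pvShiftA z1 z2 (n : Int) (if z1 > z2 then -1 else 1) k = pvShiftB z1 z2 (n : Int) k := by
  rw [pvShiftA_eq_iterate]
  induction n generalizing k with
  | zero =>
    simp only [Function.iterate_zero, id_eq, pvShiftB, Nat.cast_zero]
    split_ifs <;> omega
  | succ m ih =>
    rw [Function.iterate_succ_apply]
    have h : ((m + 1 : Nat) : Int) = (m : Int) + 1 := by push_cast; ring
    rw [h, pvShiftB_step z1 z2 k m]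
    exact ih _

-- A's outer loop from index i equals B's any over the zip of the dropped suffixes
theorem pvLoopA_eq_any (l1 l2 : List Char) (z1 z2 klucz ile : Int) (i : Nat)
    (hlen : l1.length ≤ l2.length)
    (hsh : ∀ k : Int, pvShiftA z1 z2 klucz ile k = pvShiftB z1 z2 klucz k) :
    pvLoopA l1 l2 z1 z2 klucz ile i =
      ((l1.drop i).zip (l2.drop i)).any
        (fun p => pvShiftB z1 z2 klucz (p.1.toNat : Int) ≠ (p.2.toNat : Int)) := by
  by_cases h : i < l1.length
  · have h2 : i < l2.length := lt_of_lt_of_le h hlen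
    rw [pvLoopA]
    have hd1 : l1.drop i = l1[i] :: l1.drop (i + 1) := List.drop_eq_getElem_cons h
    have hd2 : l2.drop i = l2[i] :: l2.drop (i + 1) := List.drop_eq_getElem_cons h2
    have ho1 : pvOrd l1 (i : Int) = (l1[i].toNat : Int) := by
      simp [pvOrd, List.getElem?_eq_getElem h]
    have ho2 : pvOrd l2 (i : Int) = (l2[i].toNat : Int) := by
      simp [pvOrd, List.getElem?_eq_getElem h2]
    rw [if_pos h, hd1, hd2]
    simp only [List.zip_cons_cons, List.any_cons, ho1, ho2, hsh]
    by_cases hne : pvShiftB z1 z2 klucz (l1[i].toNat : Int) ≠ (l2[i].toNat : Int)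
    · simp [hne]
    · rw [pvLoopA_eq_any l1 l2 z1 z2 klucz ile (i + 1) hlen hsh]
      simp [hne]
  · rw [pvLoopA, if_neg h]
    have hnil : l1.drop i = [] := List.drop_eq_nil_of_le (by omega)
    simp [hnil]
termination_by l1.length - i

-- ===== VERDICT (by name: the statement is the Claim_ definition above) =====
theorem deszyfr_spec : Claim_equal_deszyfr := by
  intro s1 s2 _ hpre
  obtain ⟨h1, h2, hlen⟩ := hpre
  unfold Spec_deszyfr deszyfr deszyfr_alt
  have hz1 : pvOrd s1.toList 0 = ((s1.toList.headD ' ').toNat : Int) := by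
    cases hl : s1.toList with
    | nil => exact absurd hl h1
    | cons a t => simp [pvOrd]
  have hz2 : pvOrd s2.toList 0 = ((s2.toList.headD ' ').toNat : Int) := by
    cases hl : s2.toList with
    | nil => exact absurd hl h2
    | cons a t => simp [pvOrd]
  simp only [hz1, hz2]
  set z1 : Int := ((s1.toList.headD ' ').toNat : Int) with hz1'
  set z2 : Int := ((s2.toList.headD ' ').toNat : Int) with hz2'
  by_cases h : z1 > z2
  · have habs : |z1 - z2| = z1 - z2 := abs_of_pos (by omega)
    have hcast : z1 - z2 = (((z1 - z2).toNat : Nat) : Int) := by omega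
    simp only [if_pos h, habs]
    rw [pvLoopA_eq_any s1.toList s2.toList z1 z2 (z1 - z2) (-1) 0 hlen
        (fun k => by
          have := pvShiftAB z1 z2 k (z1 - z2).toNat
          rw [← hcast] at this
          simpa [h] using this)]
    simp
  · have habs : |z1 - z2| = z2 - z1 := by rw [abs_of_nonpos (by omega)]; ring
    have hcast : z2 - z1 = (((z2 - z1).toNat : Nat) : Int) := by omega
    simp only [if_neg h, habs]
    rw [pvLoopA_eq_any s1.toList s2.toList z1 z2 (z2 - z1) 1 0 hlen
        (fun k => by
          have := pvShiftAB z1 z2 k (z2 - z1).toNat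
          rw [← hcast] at this
          simpa [h] using this)]
    simp
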